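-- pv_equiv track=rewrite | github.com/tzhou2018/LeetCode | examination/kuaishou/DistanceToHigher.py | DistanceToHigher
-- ===== SOURCE A (Python) =====
-- def DistanceToHigher(height):
--     # write code here
--     res = [0] * len(height)
--     lenHeight = len(height)
--     for i in range(lenHeight - 1, 0, -1):
--         for j in range(i - 1, -1, -1):
--             if height[j] > height[i]:
--                 res[i] = i - j
--                 break
--     return res
-- ===== SOURCE B (Python) =====
-- def DistanceToHigher(height):
--     # O(n) monotonic (strictly decreasing) stack of (index, height) pairs:
--     # nearest strictly-greater element to the left.
--     res = []
--     stack = []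
--     for i, h in enumerate(height):
--         while stack and stack[-1][1] <= h:
--             stack.pop()
--         res.append(i - stack[-1][0] if stack else 0)
--         stack.append((i, h))
--     return res
-- ===== Notes on version B (the rewrite author's own statement) =====
-- stated objective: faster
-- what changed: Replaced the quadratic backwards double scan with a single forward pass keeping a strictly decreasing monotonic stack of (index, height) pairs to find the nearest greater element on the left.
import Mathlib
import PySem

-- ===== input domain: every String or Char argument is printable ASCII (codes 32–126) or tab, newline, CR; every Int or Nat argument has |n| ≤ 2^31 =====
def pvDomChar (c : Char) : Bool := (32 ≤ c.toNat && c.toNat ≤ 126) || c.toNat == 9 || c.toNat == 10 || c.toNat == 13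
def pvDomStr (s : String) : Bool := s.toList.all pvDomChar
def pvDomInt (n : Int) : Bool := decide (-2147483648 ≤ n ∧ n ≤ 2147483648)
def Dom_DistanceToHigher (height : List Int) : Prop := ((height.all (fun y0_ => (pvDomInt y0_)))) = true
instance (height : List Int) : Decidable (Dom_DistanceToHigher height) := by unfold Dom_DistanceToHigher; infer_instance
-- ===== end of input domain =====

-- B replaces A's O(n^2) backwards double scan by a single forward pass with a
-- strictly decreasing monotonic stack (nearest greater to the left); same return value.

-- ===== PORT A =====
-- inner loop of A: 'for j in range(i-1, -1, -1): if height[j] > height[i]: <i-j>; break'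
-- (break modelled by the Option accumulator: once some, it stays)
def pvInnerA (height : List Int) (i : Int) : Option Int :=
  (PySem.List.pyRange (i - 1) (-1) (-1)).foldl
    (fun acc j =>
      match acc with
      | some v => some v
      | none =>
          if PySem.List.pyGetD height j 0 > PySem.List.pyGetD height i 0 then some (i - j)
          else none)
    none

-- res = [0] * len(height); lenHeight = len(height)  (inlined)
def DistanceToHigher (height : List Int) : List Int :=
  (PySem.List.pyRange ((height.length : Int) - 1) 0 (-1)).foldl
    (fun res i =>
      match pvInnerA height i with
      | some v => PySem.List.pySetD res i v      -- res[i] = i - j (then break)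
      | none => res)
    (List.replicate height.length (0 : Int))

-- ===== PORT B =====
-- 'while stack and stack[-1][1] <= h: stack.pop()'  (stack top = list head)
def pvPopWhile (h : Int) : List (Int × Int) → List (Int × Int)
  | [] => []
  | (j, g) :: rest => if g ≤ h then pvPopWhile h rest else (j, g) :: rest

-- 'for i, h in enumerate(height): …' with the running index i
def pvAltLoop : List Int → Int → List (Int × Int) → List Int → List Int
  | [], _, _, res => res
  | h :: rest, i, stack, res =>
      let stack' := pvPopWhile h stack
      let v : Int := match stack' with | [] => 0 | (j, _) :: _ => i - j
      pvAltLoop rest (i + 1) ((i, h) :: stack') (res ++ [v])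

def DistanceToHigher_alt (height : List Int) : List Int :=
  pvAltLoop height 0 [] []

-- ===== PRECONDITION & SPEC =====
def Spec_DistanceToHigher (height : List Int) (out : List Int) : Prop := out = DistanceToHigher_alt height
instance (height : List Int) (out : List Int) : Decidable (Spec_DistanceToHigher height out) := by unfold Spec_DistanceToHigher; infer_instance

-- ===== CLAIM (what is proved, stated in full; the proofs are below) =====
def Claim_equal_DistanceToHigher : Prop := ∀ (height : List Int), Dom_DistanceToHigher height → Spec_DistanceToHigher height (DistanceToHigher height)

-- ===== LEMMAS AND PROOFS =====

-- common specification: position (from the right end of the prefix) of the first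
-- strictly greater element, and the distance list built from it
def pvFirstIdx : List Int → Int → Option Int
  | [], _ => none
  | x :: xs, h => if x > h then some 0 else (pvFirstIdx xs h).map (· + 1)

def pvSpecAt (pre : List Int) (h : Int) : Int :=
  match pvFirstIdx pre.reverse h with
  | none => 0
  | some k => k + 1

def pvSpecGo : List Int → List Int → List Int
  | _, [] => []
  | pre, h :: rest => pvSpecAt pre h :: pvSpecGo (pre ++ [h]) rest

-- ---------- B side ----------

lemma pvPopWhile_popWhile (g h : Int) (hg : g ≤ h) :
    ∀ s : List (Int × Int), pvPopWhile h (pvPopWhile g s) = pvPopWhile h s := by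
  intro s
  induction s with
  | nil => rfl
  | cons p rest ih =>
      obtain ⟨j, x⟩ := p
      by_cases hx : x ≤ g
      · simp [pvPopWhile, hx, ih, le_trans hx hg]
      · simp [pvPopWhile, hx]

lemma pvAltLoop_eq_specGo :
    ∀ (rest : List Int) (i : Int) (pre : List Int) (stack : List (Int × Int)) (res : List Int),
      (∀ h : Int, (pvPopWhile h stack).head?.map Prod.fst
          = (pvFirstIdx pre.reverse h).map (fun k => i - 1 - k)) →
      pvAltLoop rest i stack res = res ++ pvSpecGo pre rest := by
  intro rest
  induction rest with
  | nil => intro i pre stack res _; simp [pvAltLoop, pvSpecGo]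
  | cons h rest ih =>
      intro i pre stack res hinv
      have hv : (match pvPopWhile h stack with | [] => (0 : Int) | (j, _) :: _ => i - j)
          = pvSpecAt pre h := by
        have := hinv h
        unfold pvSpecAt
        cases hF : pvFirstIdx pre.reverse h with
        | none =>
            rw [hF] at this
            cases hS : pvPopWhile h stack with
            | nil => simp
            | cons p t => rw [hS] at this; simp at this
        | some k =>
            rw [hF] at this
            cases hS : pvPopWhile h stack with
            | nil => rw [hS] at this; simp at this
            | cons p t =>
                obtain ⟨j, g⟩ := p
                rw [hS] at this
                simp at this
                show i - j = k + 1
                omega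
      have hinv' : ∀ h' : Int,
          (pvPopWhile h' ((i, h) :: pvPopWhile h stack)).head?.map Prod.fst
            = (pvFirstIdx (pre ++ [h]).reverse h').map (fun k => (i + 1) - 1 - k) := by
        intro h'
        have hrev : (pre ++ [h]).reverse = h :: pre.reverse := by simp
        rw [hrev]
        by_cases hle : h ≤ h'
        · have h1 : pvPopWhile h' ((i, h) :: pvPopWhile h stack)
              = pvPopWhile h' stack := by
            simp only [pvPopWhile, if_pos hle]
            exact pvPopWhile_popWhile h h' hle stack
          rw [h1, hinv h']
          have hnot : ¬ h > h' := by omega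
          simp only [pvFirstIdx, if_neg hnot]
          cases pvFirstIdx pre.reverse h' with
          | none => simp
          | some k => simp; omega
        · have hgt : h > h' := by omega
          simp only [pvPopWhile, if_neg hle, pvFirstIdx, if_pos hgt]
          simp
      rw [pvAltLoop, ih (i + 1) (pre ++ [h]) _ _ hinv', hv, pvSpecGo]
      simp

lemma alt_eq_specGo (height : List Int) :
    DistanceToHigher_alt height = pvSpecGo [] height := by
  have := pvAltLoop_eq_specGo height 0 [] [] []
    (by intro h; simp [pvPopWhile, pvFirstIdx])
  simpa [DistanceToHigher_alt] using this

-- ---------- A side ----------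

lemma pvInnerA_foldl_some (l : List Int) (height : List Int) (i : Int) (v : Int) :
    l.foldl
      (fun acc j =>
        match acc with
        | some v => some v
        | none =>
            if PySem.List.pyGetD height j 0 > PySem.List.pyGetD height i 0 then some (i - j)
            else none)
      (some v) = some v := by
  induction l with
  | nil => rfl
  | cons a l ih => simpa using ih

lemma pvInnerA_eq_firstIdx (height : List Int) :
    ∀ (m : Nat), m ≤ height.length → ∀ (i : Int),
      (PySem.List.pyRange ((m : Int) - 1) (-1) (-1)).foldl
          (fun acc j =>
            match acc with
            | some v => some v
            | none =>
                if PySem.List.pyGetD height j 0 > PySem.List.pyGetD height i 0 then some (i - j)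
                else none)
          none
        = (pvFirstIdx ((height.take m).reverse) (PySem.List.pyGetD height i 0)).map
            (fun k => i - ((m : Int) - 1 - k)) := by
  intro m
  induction m with
  | zero =>
      intro _ i
      rw [PySem.List.pyRange_neg_one_eq_nil (by norm_num)]
      simp [pvFirstIdx]
  | succ m ih =>
      intro hm i
      have hmlt : m < height.length := by omega
      have hcons : PySem.List.pyRange (((m : Nat) + 1 : Int) - 1) (-1) (-1)
          = (m : Int) :: PySem.List.pyRange ((m : Int) - 1) (-1) (-1) := by
        have : (((m : Nat) + 1 : Int) - 1) = (m : Int) := by omega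
        rw [this, PySem.List.pyRange_neg_one_cons (by omega)]
      have htake : (height.take (m + 1)).reverse
          = height[m] :: (height.take m).reverse := by
        rw [List.take_add_one]
        simp [List.getElem?_eq_getElem hmlt]
      have hget : PySem.List.pyGetD height (m : Int) 0 = height[m] := by
        rw [PySem.List.pyGetD_natCast]
        exact List.getD_eq_getElem _ _ hmlt
      push_cast
      push_cast at hcons
      rw [hcons, List.foldl_cons, htake]
      by_cases hgt : height[m] > PySem.List.pyGetD height i 0
      · have : (if PySem.List.pyGetD height (m : Int) 0 > PySem.List.pyGetD height i 0
            then some (i - (m : Int)) else none) = some (i - (m : Int)) := by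
          rw [hget, if_pos hgt]
        simp only [this]
        rw [pvInnerA_foldl_some]
        simp only [pvFirstIdx, if_pos hgt]
        simp
      · have : (if PySem.List.pyGetD height (m : Int) 0 > PySem.List.pyGetD height i 0
            then some (i - (m : Int)) else none) = none := by
          rw [hget, if_neg hgt]
        simp only [this]
        rw [ih (by omega) i]
        simp only [pvFirstIdx, if_neg hgt]
        cases pvFirstIdx ((height.take m).reverse) (PySem.List.pyGetD height i 0) with
        | none => simp
        | some k =>
            simp only [Option.map_some]
            congr 1
            ring

-- the value A's inner loop leaves at index m equals pvSpecAt on the prefix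
lemma pvInnerA_spec (height : List Int) (m : Nat) (hm : m < height.length) :
    (match pvInnerA height (m : Int) with
      | some v => v
      | none => (0 : Int)) = pvSpecAt (height.take m) (PySem.List.pyGetD height (m : Int) 0) := by
  unfold pvInnerA pvSpecAt
  rw [pvInnerA_eq_firstIdx height m (le_of_lt hm) (m : Int)]
  cases pvFirstIdx ((height.take m).reverse) (PySem.List.pyGetD height (m : Int) 0) with
  | none => simp
  | some k => simp; ring

-- the foldl of sets: length is preserved
lemma foldlA_length (height : List Int) :
    ∀ (l : List Int) (r : List Int),
      (l.foldl (fun res i =>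
          match pvInnerA height i with
          | some v => PySem.List.pySetD res i v
          | none => res) r).length = r.length := by
  intro l
  induction l with
  | nil => intro r; rfl
  | cons a l ih =>
      intro r
      rw [List.foldl_cons, ih]
      cases pvInnerA height a with
      | some v => simp [PySem.List.length_pySetD]
      | none => rfl

-- the foldl of sets, elementwise
lemma foldlA_getElem? (height : List Int) :
    ∀ (l : List Int) (r : List Int) (m : Nat), m < r.length →
      (∀ j ∈ l, 0 ≤ j) →
      (l.foldl (fun res i =>
          match pvInnerA height i with
          | some v => PySem.List.pySetD res i v
          | none => res) r)[m]?
        = if (m : Int) ∈ l ∧ pvInnerA height (m : Int) ≠ none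
          then some ((pvInnerA height (m : Int)).getD 0)
          else r[m]? := by
  intro l
  induction l with
  | nil => intro r m hm _; simp
  | cons a l ih =>
      intro r m hm hpos
      have ha : 0 ≤ a := hpos a (by simp)
      have hrlen : m < (match pvInnerA height a with
          | some v => PySem.List.pySetD r a v
          | none => r).length := by
        cases pvInnerA height a with
        | some v => simpa [PySem.List.length_pySetD] using hm
        | none => exact hm
      rw [List.foldl_cons, ih _ m hrlen (fun j hj => hpos j (by simp [hj]))]
      by_cases hml : (m : Int) ∈ l ∧ pvInnerA height (m : Int) ≠ none
      · rw [if_pos hml, if_pos ⟨by simp [hml.1], hml.2⟩]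
      · rw [if_neg hml]
        by_cases hma : a = (m : Int)
        · subst hma
          cases hInner : pvInnerA height (m : Int) with
          | some v =>
              rw [if_pos ⟨by simp, by simp⟩]
              have hset : PySem.List.pySetD r ((m : Nat) : Int) v = r.set m v := by
                exact_mod_cast PySem.List.pySetD_natCast r m v
              simp [hset, hm]
          | none =>
              rw [if_neg (by simp)]
        · have hiff : (((m : Int) ∈ a :: l) ∧ pvInnerA height (m : Int) ≠ none) ↔
              (((m : Int) ∈ l) ∧ pvInnerA height (m : Int) ≠ none) := by
            constructor
            · rintro ⟨hmem, hn⟩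
              rcases List.mem_cons.mp hmem with h | h
              · exact absurd h.symm hma
              · exact ⟨h, hn⟩
            · rintro ⟨hmem, hn⟩; exact ⟨by simp [hmem], hn⟩
          rw [if_neg (by rw [hiff]; exact hml)]
          cases hInner : pvInnerA height a with
          | some v =>
              have hset : PySem.List.pySetD r a v = r.set a.toNat v :=
                PySem.List.pySetD_of_nonneg r v ha
              have hne : a.toNat ≠ m := by omega
              simp [hset, hne]
          | none => simp

-- spec list: length and elements
lemma pvSpecGo_length : ∀ (rest pre : List Int), (pvSpecGo pre rest).length = rest.length := by
  intro rest
  induction rest with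
  | nil => intro pre; rfl
  | cons h rest ih => intro pre; simp [pvSpecGo, ih]

lemma pvSpecGo_getElem :
    ∀ (rest pre : List Int) (m : Nat) (hm : m < rest.length),
      (pvSpecGo pre rest)[m]'(by rw [pvSpecGo_length]; exact hm)
        = pvSpecAt (pre ++ rest.take m) (rest[m]) := by
  intro rest
  induction rest with
  | nil => intro pre m hm; simp at hm
  | cons h rest ih =>
      intro pre m hm
      cases m with
      | zero => simp [pvSpecGo]
      | succ m =>
          have := ih (pre ++ [h]) m (by simpa using hm)
          simp only [pvSpecGo, List.getElem_cons_succ, List.take_succ_cons]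
          rw [this]
          simp

lemma a_eq_specGo (height : List Int) :
    DistanceToHigher height = pvSpecGo [] height := by
  apply List.ext_getElem?
  intro m
  by_cases hmlen : m < height.length
  · have hpos : ∀ j ∈ PySem.List.pyRange ((height.length : Int) - 1) 0 (-1), 0 ≤ j := by
      intro j hj
      rw [PySem.List.mem_pyRange_neg_one] at hj
      omega
    have hspec : (pvSpecGo [] height)[m]?
        = some (pvSpecAt (height.take m) (height[m])) := by
      rw [List.getElem?_eq_getElem (by rw [pvSpecGo_length]; exact hmlen)]
      rw [pvSpecGo_getElem height [] m hmlen]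
      simp
    unfold DistanceToHigher
    rw [foldlA_getElem? height _ _ m (by simpa using hmlen) hpos, hspec]
    have hgetd : PySem.List.pyGetD height ((m : Nat) : Int) 0 = height[m] := by
      rw [PySem.List.pyGetD_natCast]
      exact List.getD_eq_getElem _ _ hmlen
    by_cases hmem : ((m : Int) ∈ PySem.List.pyRange ((height.length : Int) - 1) 0 (-1))
        ∧ pvInnerA height (m : Int) ≠ none
    · rw [if_pos hmem]
      have hs := pvInnerA_spec height m hmlen
      rw [hgetd] at hs
      cases hI : pvInnerA height (m : Int) with
      | none => exact absurd hI hmem.2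
      | some v =>
          rw [hI] at hs
          simp at hs ⊢
          omega
    · rw [if_neg hmem]
      rw [List.getElem?_eq_getElem (by simpa using hmlen)]
      simp only [List.getElem_replicate, Option.some.injEq]
      by_cases hm0 : m = 0
      · subst hm0
        simp [pvSpecAt, pvFirstIdx]
      · have hin : (m : Int) ∈ PySem.List.pyRange ((height.length : Int) - 1) 0 (-1) := by
          rw [PySem.List.mem_pyRange_neg_one]
          omega
        have hnone : pvInnerA height (m : Int) = none := by
          by_contra hne
          exact hmem ⟨hin, hne⟩
        have hs := pvInnerA_spec height m hmlen
        rw [hnone, hgetd] at hs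
        simpa using hs
  · have h1 : (DistanceToHigher height).length = height.length := by
      unfold DistanceToHigher
      rw [foldlA_length, List.length_replicate]
    have h2 : (pvSpecGo [] height).length = height.length := pvSpecGo_length height []
    rw [List.getElem?_eq_none (by omega), List.getElem?_eq_none (by omega)]

-- ===== VERDICT (by name: the statement is the Claim_ definition above) =====
theorem DistanceToHigher_spec : Claim_equal_DistanceToHigher := by
  intro height _
  unfold Spec_DistanceToHigher
  rw [a_eq_specGo, alt_eq_specGo]
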